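-- pv_equiv track=rewrite | github.com/m6r-ai/humbug | src/syntax/lexer.py | build_operator_map
-- ===== SOURCE A (Python) =====
-- from typing import List, Callable, Set, ClassVar, Dict
--
-- def build_operator_map(operators: List[str]) -> Dict[str, List[str]]:
--     """
--     Build an operator map from a list of operators.
--
--     Args:
--         operators: List of operator strings
--
--     Returns:
--         A dictionary mapping first characters to lists of operators
--         starting with that character, sorted by length (longest first)
--     """
--     operator_map: Dict[str, List[str]] = {}
--     for op in operators:
--         if not op:
--             continue
--
--         first_char = op[0]
--         if first_char not in operator_map:
--             operator_map[first_char] = []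
--
--         operator_map[first_char].append(op)
--
--     # Sort each list by length, longest first to ensure greedy matching
--     for _first_char, operators_list in operator_map.items():
--         operators_list.sort(key=len, reverse=True)
--
--     return operator_map
-- ===== SOURCE B (Python) =====
-- def build_operator_map(operators):
--     """Same result, computed declaratively: dedup of first characters in order of
--     first appearance, then one sorted-filter comprehension per key (no in-place
--     dict building or per-bucket mutation)."""
--     ops = [op for op in operators if op]
--     order = list(dict.fromkeys(op[:1] for op in ops))
--     return {c: sorted((op for op in ops if op[:1] == c), key=len, reverse=True)
--             for c in order}
-- ===== Notes on version B (the rewrite author's own statement) =====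
-- stated objective: simpler
-- what changed: Replaces the incremental dict-building loop with in-place per-bucket sorting by a declarative pipeline: filter out empties, dedup first characters in first-appearance order, then build each bucket with one sorted-filter comprehension per key.
import Mathlib
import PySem

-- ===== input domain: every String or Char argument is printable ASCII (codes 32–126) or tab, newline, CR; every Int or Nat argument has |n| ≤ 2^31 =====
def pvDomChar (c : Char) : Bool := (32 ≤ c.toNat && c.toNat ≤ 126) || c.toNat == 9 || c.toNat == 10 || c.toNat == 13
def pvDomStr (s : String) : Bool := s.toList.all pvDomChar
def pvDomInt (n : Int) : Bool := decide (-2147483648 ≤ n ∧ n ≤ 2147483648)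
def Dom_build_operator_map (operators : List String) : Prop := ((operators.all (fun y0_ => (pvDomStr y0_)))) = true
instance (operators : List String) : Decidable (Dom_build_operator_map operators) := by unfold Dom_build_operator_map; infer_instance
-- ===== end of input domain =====

-- B replaces A's incremental dict-building loop + per-bucket in-place sort by a declarative
-- dedup-then-filter-per-key pipeline (objective: simpler; same asymptotic cost).
-- ===== PORT A =====
def build_operator_map (operators : List String) : List (String × List String) :=
  let d : PySem.Dict String (List String) :=
    operators.foldl (fun d op =>
      if op = "" then d  -- 'if not op: continue'
      else
        -- first_char = op[0]: a 1-character Python str, hence String.ofList [c]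
        let fc : String := match PySem.Str.pyGet? op 0 with
          | some c => String.ofList [c]
          | none => ""   -- unreachable: op ≠ ""
        let d1 := if d.contains fc then d else d.insert fc []
        d1.modify fc [] (fun l => l ++ [op])
    ) PySem.Dict.empty
  -- second loop: each bucket sorted in place by len, longest first; items order kept
  d.items.map (fun p => (p.1, PySem.List.sorted p.2 (fun s => PySem.Str.len s) true))

-- ===== PORT B =====
-- op[:1] : first character as a string ("" for the empty string)
def pvFirst (s : String) : String := String.ofList (s.toList.take 1)

def build_operator_map_alt (operators : List String) : List (String × List String) :=
  let ops := operators.filter (fun op => !(op == ""))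
  let order := PySem.List.dedup (ops.map pvFirst)
  order.map (fun c =>
    (c, PySem.List.sorted (ops.filter (fun op => pvFirst op == c)) (fun s => PySem.Str.len s) true))

-- ===== PRECONDITION & SPEC =====
def Spec_build_operator_map (operators : List String) (out : List (String × List String)) : Prop := out = build_operator_map_alt operators
instance (operators : List String) (out : List (String × List String)) : Decidable (Spec_build_operator_map operators out) := by unfold Spec_build_operator_map; infer_instance

-- ===== CLAIM (what is proved, stated in full; the proofs are below) =====
def Claim_equal_build_operator_map : Prop := ∀ (operators : List String), Dom_build_operator_map operators → Spec_build_operator_map operators (build_operator_map operators)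

-- ===== LEMMAS AND PROOFS =====

-- the filtered operator list and the plain "group by first char" dict, used only by the proofs
def pvOps (operators : List String) : List String :=
  operators.filter (fun op => !(op == ""))

def pvDict (operators : List String) : PySem.Dict String (List String) :=
  (pvOps operators).foldl (fun d op => d.modify (pvFirst op) [] (fun l => l ++ [op]))
    PySem.Dict.empty

-- A's conditional-insert-then-append step is exactly Dict.modify with default []
theorem pv_step_eq (d : PySem.Dict String (List String)) (k : String) (op : String) :
    (if d.contains k then d else d.insert k []).modify k [] (fun l => l ++ [op])
      = d.modify k [] (fun l => l ++ [op]) := by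
  by_cases h : d.contains k = true
  · simp [h]
  · simp only [Bool.not_eq_true] at h
    simp [h, PySem.Dict.modify, PySem.Dict.getD_insert_self, PySem.Dict.insert_insert_self,
      PySem.Dict.getD_of_not_contains, h]

-- on a nonempty string, A's computed first-char key is pvFirst
theorem pv_fc_eq (op : String) (c : Char) (t : List Char) (h : op.toList = c :: t) :
    (match PySem.Str.pyGet? op 0 with
      | some c => String.ofList [c]
      | none => "") = pvFirst op := by
  simp [PySem.Str.pyGet?, h, pvFirst]

-- A's dict-building loop computes pvDict
theorem pv_loop_eq (operators : List String) :
    operators.foldl (fun d op =>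
      if op = "" then d
      else
        let fc : String := match PySem.Str.pyGet? op 0 with
          | some c => String.ofList [c]
          | none => ""
        let d1 := if d.contains fc then d else d.insert fc []
        d1.modify fc [] (fun l => l ++ [op])) PySem.Dict.empty
      = pvDict operators := by
  unfold pvDict pvOps
  rw [← PySem.List.foldl_if_eq_foldl_filter]
  apply PySem.List.foldl_congr_mem
  intro d op _
  by_cases hop : op = ""
  · simp [hop]
  · have hlist : op.toList ≠ [] := by
      intro hnil
      apply hop
      have h2 := congrArg String.ofList hnil
      simpa using h2
    obtain ⟨c, t, h⟩ : ∃ c t, op.toList = c :: t := by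
      cases hx : op.toList with
      | nil => exact absurd hx hlist
      | cons c t => exact ⟨c, t, rfl⟩
    simp only [hop, if_false, pv_fc_eq op c t h, pv_step_eq]
    simp [hop]

-- the items of pvDict: keys in first-appearance order, each bucket the filtered sublist
theorem pv_items_eq (operators : List String) :
    (pvDict operators).items
      = (PySem.List.dedup ((pvOps operators).map pvFirst)).map
          (fun c => (c, (pvOps operators).filter (fun op => pvFirst op == c))) := by
  have hnd : (pvDict operators).keys.Nodup := by
    unfold pvDict
    exact PySem.Dict.nodup_keys_foldl_modify_key _ _ _ _ _ (by simp [PySem.Dict.keys_empty])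
  have hkeys : (pvDict operators).keys = PySem.List.dedup ((pvOps operators).map pvFirst) := by
    unfold pvDict
    rw [PySem.Dict.keys_foldl_modify_key]
    simp [PySem.Dict.keys_empty, PySem.Set.update_nil_left]
  have hgetD : ∀ c, (pvDict operators).getD c []
      = (pvOps operators).filter (fun op => pvFirst op == c) := by
    intro c
    have hmap : pvDict operators
        = ((pvOps operators).map (fun op => (pvFirst op, op))).foldl
            (fun d p => d.modify p.1 [] (fun l => l ++ [p.2])) PySem.Dict.empty := by
      unfold pvDict; rw [List.foldl_map]
    rw [hmap, PySem.Dict.getD_foldl_modify_append]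
    simp [PySem.Dict.getD_empty, List.filter_map, Function.comp_def]
  rw [PySem.Dict.items_eq_map_keys _ hnd ([] : List String), hkeys]
  exact List.map_congr_left (fun c _ => by rw [hgetD c])

-- ===== VERDICT (by name: the statement is the Claim_ definition above) =====
theorem build_operator_map_spec : Claim_equal_build_operator_map := by
  intro operators _
  unfold Spec_build_operator_map
  show build_operator_map operators = build_operator_map_alt operators
  simp only [build_operator_map, build_operator_map_alt]
  rw [pv_loop_eq, pv_items_eq, List.map_map]
  simp [pvOps, Function.comp_def]
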